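-- pv_equiv track=rewrite | github.com/zZedix/smite-mesh | node/app/wireguard_adapter.py | _parse_wg_status
-- ===== SOURCE A (Python) =====
-- def _parse_wg_status(output: str) -> list:
--     """Parse wg show output to extract peer information"""
--     peers = []
--     current_peer = None
--
--     for line in output.splitlines():
--         line = line.strip()
--         if line.startswith("peer:"):
--             if current_peer:
--                 peers.append(current_peer)
--             current_peer = {"public_key": line.split(":", 1)[1].strip()}
--         elif line.startswith("endpoint:") and current_peer:
--             current_peer["endpoint"] = line.split(":", 1)[1].strip()
--         elif line.startswith("allowed ips:") and current_peer:
--             current_peer["allowed_ips"] = line.split(":", 1)[1].strip()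
--         elif line.startswith("latest handshake:") and current_peer:
--             handshake = line.split(":", 1)[1].strip()
--             if handshake and handshake != "(none)":
--                 current_peer["last_handshake"] = handshake
--                 current_peer["connected"] = True
--             else:
--                 current_peer["connected"] = False
--
--     if current_peer:
--         peers.append(current_peer)
--
--     return peers
-- ===== SOURCE B (Python) =====
-- def _parse_wg_status(output: str) -> list:
--     """Parse wg show output: group stripped lines into peer blocks, then build each peer dict."""
--     lines = [l.strip() for l in output.splitlines()]
--     blocks = []
--     for line in lines:
--         if line.startswith("peer:"):
--             blocks.append([line])
--         elif blocks:
--             blocks[-1].append(line)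
--     return [_build_peer(b) for b in blocks]
--
--
-- def _build_peer(block):
--     peer = {"public_key": block[0].split(":", 1)[1].strip()}
--     for line in block[1:]:
--         parts = line.split(":", 1)
--         if len(parts) != 2:
--             continue
--         key, value = parts[0], parts[1].strip()
--         if key == "endpoint":
--             peer["endpoint"] = value
--         elif key == "allowed ips":
--             peer["allowed_ips"] = value
--         elif key == "latest handshake":
--             if value and value != "(none)":
--                 peer["last_handshake"] = value
--                 peer["connected"] = True
--             else:
--                 peer["connected"] = False
--     return peer
-- ===== Notes on version B (the rewrite author's own statement) =====
-- stated objective: alternative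
-- what changed: Replaces A's one-pass running-accumulator state machine (peers list + mutable current_peer) with a two-phase structure: first group the stripped lines into per-peer blocks (dropping lines before the first peer header), then build each peer dict independently from its block, dispatching on the text before the line's first colon instead of startswith-guarded elif chains.
import Mathlib
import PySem

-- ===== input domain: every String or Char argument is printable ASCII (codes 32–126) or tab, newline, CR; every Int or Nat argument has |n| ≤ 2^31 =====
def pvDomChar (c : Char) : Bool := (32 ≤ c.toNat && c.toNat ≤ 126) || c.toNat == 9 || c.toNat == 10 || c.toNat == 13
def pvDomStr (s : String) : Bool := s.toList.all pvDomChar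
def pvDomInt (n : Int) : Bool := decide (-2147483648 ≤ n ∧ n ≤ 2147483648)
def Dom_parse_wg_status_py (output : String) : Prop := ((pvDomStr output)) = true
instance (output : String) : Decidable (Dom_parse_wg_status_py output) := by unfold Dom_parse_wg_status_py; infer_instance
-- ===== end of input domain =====

-- B re-groups the stripped lines into per-peer blocks first and then builds each peer dict
-- independently (two-phase group-then-build), instead of A's running current-peer state machine;
-- same return value on every input (Python booleans True/False in the "connected" field are
-- rendered as the strings "True"/"False" identically in both ports).

-- ===== PORT A =====
-- line.split(":", 1)[1] — the callers only evaluate it on lines that start with "<key>:", so a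
-- a colon is present and index 1 exists (the getD defaults are never used there)
def pwA_afterColon (line : String) : String :=
  ((PySem.Str.splitMax? line ":" 1).getD []).getD 1 ""

-- A's loop body on the already-stripped line; 'and current_peer' is current_peer's truthiness:
-- the dict always contains "public_key", hence non-empty, so it is Option.isSome.
-- Python's bool values True/False (for "connected") are rendered "True"/"False" (same in port B).
def pwA_core (st : List (PySem.Dict String String) × Option (PySem.Dict String String))
    (line : String) :
    List (PySem.Dict String String) × Option (PySem.Dict String String) :=
  if PySem.Str.startswith line "peer:" then
    let peers := match st.2 with
      | some c => st.1 ++ [c]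
      | none => st.1
    (peers, some (PySem.Dict.ofList [("public_key", PySem.Str.strip (pwA_afterColon line))]))
  else if PySem.Str.startswith line "endpoint:" && st.2.isSome then
    (st.1, st.2.map (fun c => c.insert "endpoint" (PySem.Str.strip (pwA_afterColon line))))
  else if PySem.Str.startswith line "allowed ips:" && st.2.isSome then
    (st.1, st.2.map (fun c => c.insert "allowed_ips" (PySem.Str.strip (pwA_afterColon line))))
  else if PySem.Str.startswith line "latest handshake:" && st.2.isSome then
    let handshake := PySem.Str.strip (pwA_afterColon line)
    if handshake ≠ "" ∧ handshake ≠ "(none)" then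
      (st.1, st.2.map (fun c => (c.insert "last_handshake" handshake).insert "connected" "True"))
    else
      (st.1, st.2.map (fun c => c.insert "connected" "False"))
  else st

def parse_wg_status_py (output : String) : List (List (String × String)) :=
  let st := (PySem.Str.splitlines output).foldl
    (fun st raw => pwA_core st (PySem.Str.strip raw)) ([], none)
  let peers := match st.2 with
    | some c => st.1 ++ [c]
    | none => st.1
  peers.map (fun d => d.items)

-- ===== PORT B =====
-- _build_peer's loop body: dispatch on the text before the first colon (line.split(":", 1));
-- booleans rendered "True"/"False" exactly as in port A
def pwB_field (peer : PySem.Dict String String) (line : String) : PySem.Dict String String :=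
  match (PySem.Str.splitMax? line ":" 1).getD [] with
  | [key, rest] =>
    let value := PySem.Str.strip rest
    if key = "endpoint" then peer.insert "endpoint" value
    else if key = "allowed ips" then peer.insert "allowed_ips" value
    else if key = "latest handshake" then
      if value ≠ "" ∧ value ≠ "(none)" then
        (peer.insert "last_handshake" value).insert "connected" "True"
      else peer.insert "connected" "False"
    else peer
  | _ => peer

-- _build_peer: block[0] is the "peer:" head line (blocks are built non-empty, headD's default is
-- never used); block[0].split(":", 1)[1] as in pwA_afterColon
def pwB_build (block : List String) : PySem.Dict String String :=
  (block.drop 1).foldl pwB_field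
    (PySem.Dict.ofList
      [("public_key",
        PySem.Str.strip (((PySem.Str.splitMax? (block.headD "") ":" 1).getD []).getD 1 ""))])

-- blocks[-1].append(line) (blocks is non-empty in that branch)
def pwB_appendLast : List (List String) → String → List (List String)
  | [], _ => []
  | [b], x => [b ++ [x]]
  | b :: bs, x => b :: pwB_appendLast bs x

def pwB_groupStep (blocks : List (List String)) (line : String) : List (List String) :=
  if PySem.Str.startswith line "peer:" then blocks ++ [[line]]
  else if blocks.isEmpty then blocks
  else pwB_appendLast blocks line

def parse_wg_status_py_alt (output : String) : List (List (String × String)) :=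
  let lines := (PySem.Str.splitlines output).map PySem.Str.strip
  let blocks := lines.foldl pwB_groupStep []
  (blocks.map pwB_build).map (fun d => d.items)

-- ===== PRECONDITION & SPEC =====
def Spec_parse_wg_status_py (output : String) (out : List (List (String × String))) : Prop :=
  out = parse_wg_status_py_alt output
instance (output : String) (out : List (List (String × String))) :
    Decidable (Spec_parse_wg_status_py output out) := by
  unfold Spec_parse_wg_status_py; infer_instance

-- ===== CLAIM (what is proved, stated in full; the proofs are below) =====
def Claim_equal_parse_wg_status_py : Prop := ∀ (output : String), Dom_parse_wg_status_py output → Spec_parse_wg_status_py output (parse_wg_status_py output)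

-- ===== LEMMAS AND PROOFS =====

-- characterization of line.split(":", 1): the fuelled splitter once the budget m hit 0
lemma pwGoZero (fuel : Nat) (l cur : List Char) (acc : List (List Char)) :
    PySem.Chars.splitOnMax.go [':'] fuel 0 l cur acc =
      ((cur.reverse ++ l) :: acc).reverse := by
  cases fuel with
  | zero => rfl
  | succ f => cases l with
    | nil =>
      have h : PySem.Chars.splitOnMax.go [':'] (f + 1) 0 [] cur acc =
          (cur.reverse :: acc).reverse := rfl
      rw [h]; simp
    | cons c rest =>
      conv_lhs => rw [PySem.Chars.splitOnMax.go]
      simp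

lemma pwGoOne (cs : List Char) : ∀ (fuel : Nat) (cur : List Char) (acc : List (List Char)),
    cs.length < fuel →
    PySem.Chars.splitOnMax.go [':'] fuel 1 cs cur acc =
      acc.reverse ++ (if ':' ∈ cs
        then [cur.reverse ++ cs.takeWhile (fun x => !decide (x = ':')),
              (cs.dropWhile (fun x => !decide (x = ':'))).tail]
        else [cur.reverse ++ cs]) := by
  induction cs with
  | nil =>
    intro fuel cur acc h
    cases fuel with
    | zero => omega
    | succ f =>
      have h0 : PySem.Chars.splitOnMax.go [':'] (f + 1) 1 [] cur acc =
          (cur.reverse :: acc).reverse := rfl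
      rw [h0]; simp
  | cons c rest ih =>
    intro fuel cur acc h
    cases fuel with
    | zero => omega
    | succ f =>
      by_cases hc : c = ':'
      · subst hc
        conv_lhs => rw [PySem.Chars.splitOnMax.go]
        simp only [List.isPrefixOf, BEq.rfl, Bool.true_and, List.isPrefixOf_nil_left,
          if_true, List.length_cons, List.drop_succ_cons]
        rw [pwGoZero]
        simp [List.takeWhile_cons, List.dropWhile_cons]
      · have hpre : List.isPrefixOf [':'] (c :: rest) = false := by
          simp [List.isPrefixOf]
          exact fun h' => (hc h'.symm).elim
        conv_lhs => rw [PySem.Chars.splitOnMax.go]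
        simp only [hpre, Bool.false_eq_true, if_false]
        rw [ih f (c :: cur) acc (by simpa using Nat.lt_of_succ_lt_succ h)]
        by_cases hm : ':' ∈ rest <;>
          simp [List.takeWhile_cons, List.dropWhile_cons, hc, Ne.symm hc, hm]

lemma pwSplitColon (cs : List Char) :
    PySem.Chars.splitOnMax cs [':'] 1 =
      (if ':' ∈ cs
        then [cs.takeWhile (fun x => !decide (x = ':')),
              (cs.dropWhile (fun x => !decide (x = ':'))).tail]
        else [cs]) := by
  unfold PySem.Chars.splitOnMax
  rw [if_neg (by omega), show ((1:Int).toNat) = 1 from rfl,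
    pwGoOne cs (cs.length + 1) [] [] (by omega)]
  simp

lemma pwStartswithKey (k cs : List Char) (hk : (':' : Char) ∉ k) :
    PySem.Chars.startswith cs (k ++ [':']) = true ↔
      (':' ∈ cs ∧ cs.takeWhile (fun x => !decide (x = ':')) = k) := by
  rw [PySem.Chars.startswith_iff]
  constructor
  · rintro ⟨t, rfl⟩
    have htk : List.takeWhile (fun x => !decide (x = ':')) k = k :=
      List.takeWhile_eq_self_iff.mpr
        (fun a ha => by simpa using fun h : a = ':' => hk (h ▸ ha))
    refine ⟨by simp, ?_⟩
    rw [List.append_assoc, List.cons_append, List.nil_append, List.takeWhile_append]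
    simp [htk]
  · rintro ⟨hmem, htw⟩
    have hsplit := List.takeWhile_append_dropWhile
      (p := fun x : Char => !decide (x = ':')) (l := cs)
    have hdrop : cs.dropWhile (fun x : Char => !decide (x = ':')) ≠ [] := by
      intro hnil
      rw [← hsplit, hnil, List.append_nil] at hmem
      have := List.mem_takeWhile_imp hmem
      simp at this
    obtain ⟨d, ds, hds⟩ := List.exists_cons_of_ne_nil hdrop
    have hd := List.head_dropWhile_not
      (p := fun x : Char => !decide (x = ':')) (l := cs) hdrop
    simp only [hds, List.head_cons, Bool.not_eq_false', decide_eq_true_eq] at hd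
    refine ⟨ds, ?_⟩
    rw [← hsplit, htw, hds, hd]
    simp

lemma pwOfListEq (l : List Char) (s : String) : String.ofList l = s ↔ l = s.toList := by
  constructor
  · intro h; rw [← h]; simp
  · intro h; subst h; simp

-- the two ports split/compare the same stripped line the same way: A's startswith-guarded elif
-- chain equals B's split-at-first-colon dispatch, on a line that does not start with "peer:"
lemma pwFieldEq (ps : List (PySem.Dict String String)) (c : PySem.Dict String String)
    (line : String) (hnp : PySem.Str.startswith line "peer:" = false) :
    pwA_core (ps, some c) line = (ps, some (pwB_field c line)) := by
  have hnp2 := hnp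
  simp at hnp2
  have hsw : ∀ k : List Char, (':' : Char) ∉ k →
      PySem.Chars.startswith line.toList (k ++ [':']) =
        decide (':' ∈ line.toList ∧
          line.toList.takeWhile (fun x => !decide (x = ':')) = k) := by
    intro k hk
    by_cases h : ':' ∈ line.toList ∧
        line.toList.takeWhile (fun x => !decide (x = ':')) = k
    · simp [h, (pwStartswithKey k line.toList hk).mpr h]
    · simp only [h, decide_false]
      exact Bool.eq_false_iff.mpr (fun hh => h ((pwStartswithKey k line.toList hk).mp hh))
  by_cases hc : ':' ∈ line.toList
  · have hB : (PySem.Str.splitMax? line ":" 1).getD [] =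
        [String.ofList (line.toList.takeWhile (fun x => !decide (x = ':'))),
         String.ofList ((line.toList.dropWhile (fun x => !decide (x = ':'))).tail)] := by
      simp [PySem.Str.splitMax?, PySem.Chars.splitMax?, pwSplitColon, hc]
    have hA : pwA_afterColon line =
        String.ofList ((line.toList.dropWhile (fun x => !decide (x = ':'))).tail) := by
      simp [pwA_afterColon, hB]
    have he := hsw ['e','n','d','p','o','i','n','t'] (by decide)
    have ha := hsw ['a','l','l','o','w','e','d',' ','i','p','s'] (by decide)
    have hh := hsw ['l','a','t','e','s','t',' ','h','a','n','d','s','h','a','k','e'] (by decide)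
    simp only [List.cons_append, List.nil_append] at he ha hh
    simp only [pwA_core, pwB_field, hA, hB, PySem.Str.startswith_eq, he, ha, hh]
    by_cases h1 : line.toList.takeWhile (fun x => !decide (x = ':')) =
        ['e','n','d','p','o','i','n','t']
    · have he' : PySem.Chars.startswith line.toList
          ['e','n','d','p','o','i','n','t',':'] = true := by rw [he]; simp [hc, h1]
      have ha' : PySem.Chars.startswith line.toList
          ['a','l','l','o','w','e','d',' ','i','p','s',':'] = false := by rw [ha]; simp [h1]
      have hh' : PySem.Chars.startswith line.toList
          ['l','a','t','e','s','t',' ','h','a','n','d','s','h','a','k','e',':'] = false := by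
        rw [hh]; simp [h1]
      simp [hnp2, he', ha', hh', h1, pwOfListEq]
    · by_cases h2 : line.toList.takeWhile (fun x => !decide (x = ':')) =
          ['a','l','l','o','w','e','d',' ','i','p','s']
      · have he' : PySem.Chars.startswith line.toList
            ['e','n','d','p','o','i','n','t',':'] = false := by rw [he]; simp [h2]
        have ha' : PySem.Chars.startswith line.toList
            ['a','l','l','o','w','e','d',' ','i','p','s',':'] = true := by
          rw [ha]; simp [hc, h2]
        have hh' : PySem.Chars.startswith line.toList
            ['l','a','t','e','s','t',' ','h','a','n','d','s','h','a','k','e',':'] = false := by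
          rw [hh]; simp [h2]
        simp [hnp2, he', ha', hh', h1, h2, pwOfListEq]
      · by_cases h3 : line.toList.takeWhile (fun x => !decide (x = ':')) =
            ['l','a','t','e','s','t',' ','h','a','n','d','s','h','a','k','e']
        · have he' : PySem.Chars.startswith line.toList
              ['e','n','d','p','o','i','n','t',':'] = false := by rw [he]; simp [h3]
          have ha' : PySem.Chars.startswith line.toList
              ['a','l','l','o','w','e','d',' ','i','p','s',':'] = false := by
            rw [ha]; simp [h3]
          have hh' : PySem.Chars.startswith line.toList
              ['l','a','t','e','s','t',' ','h','a','n','d','s','h','a','k','e',':'] = true := by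
            rw [hh]; simp [hc, h3]
          simp only [hnp2, he', ha', hh', h1, h2, h3, pwOfListEq, Bool.false_eq_true,
            if_false, if_true, Option.isSome_some, Bool.and_true, Option.map_some,
            reduceIte, decide_true]
          split_ifs <;> simp_all
        · have he' : PySem.Chars.startswith line.toList
              ['e','n','d','p','o','i','n','t',':'] = false := by rw [he]; simp [h1]
          have ha' : PySem.Chars.startswith line.toList
              ['a','l','l','o','w','e','d',' ','i','p','s',':'] = false := by
            rw [ha]; simp [h2]
          have hh' : PySem.Chars.startswith line.toList
              ['l','a','t','e','s','t',' ','h','a','n','d','s','h','a','k','e',':'] = false := by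
            rw [hh]; simp [h3]
          simp [hnp2, he', ha', hh', h1, h2, h3, pwOfListEq]
  · -- no ':' in the line: none of the "<key>:" prefixes match, and split gives a single piece
    have hB : (PySem.Str.splitMax? line ":" 1).getD [] = [String.ofList line.toList] := by
      simp [PySem.Str.splitMax?, PySem.Chars.splitMax?, pwSplitColon, hc]
    have hfalse : ∀ k : List Char, (':' : Char) ∉ k →
        PySem.Chars.startswith line.toList (k ++ [':']) = false := by
      intro k hk
      rw [hsw k hk]
      simp [hc]
    have he := hfalse ['e','n','d','p','o','i','n','t'] (by decide)
    have ha := hfalse ['a','l','l','o','w','e','d',' ','i','p','s'] (by decide)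
    have hh := hfalse ['l','a','t','e','s','t',' ','h','a','n','d','s','h','a','k','e'] (by decide)
    simp only [List.cons_append, List.nil_append] at he ha hh
    simp [pwA_core, pwB_field, hB, PySem.Str.startswith_eq, he, ha, hh, hnp2]

lemma pwAppendLastConcat (bs : List (List String)) (b : List String) (x : String) :
    pwB_appendLast (bs ++ [b]) x = bs ++ [b ++ [x]] := by
  induction bs with
  | nil => rfl
  | cons h t ih =>
    cases t with
    | nil => simp [pwB_appendLast]
    | cons h2 t2 => simp [pwB_appendLast] at ih ⊢; exact ih

lemma pwBuildConcat (b : List String) (hb : b ≠ []) (x : String) :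
    pwB_build (b ++ [x]) = pwB_field (pwB_build b) x := by
  obtain ⟨h, t, rfl⟩ := List.exists_cons_of_ne_nil hb
  simp [pwB_build]

-- the invariant tying A's (peers, current_peer) state to B's block list
def pwRel (st : List (PySem.Dict String String) × Option (PySem.Dict String String))
    (bs : List (List String)) : Prop :=
  (st.2 = none ∧ st.1 = [] ∧ bs = []) ∨
  (∃ b bs', b ≠ [] ∧ st.2 = some (pwB_build b) ∧ bs = bs' ++ [b] ∧ st.1 = bs'.map pwB_build)

lemma pwStep (st : List (PySem.Dict String String) × Option (PySem.Dict String String))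
    (bs : List (List String)) (line : String) (h : pwRel st bs) :
    pwRel (pwA_core st line) (pwB_groupStep bs line) := by
  by_cases hp : PySem.Str.startswith line "peer:" = true
  · -- a "peer:" line: A flushes current_peer and starts a new one; B starts a new block
    have hp2 := hp
    simp at hp2
    have hA : pwA_core st line =
        ((match st.2 with | some c => st.1 ++ [c] | none => st.1),
          some (PySem.Dict.ofList [("public_key", PySem.Str.strip (pwA_afterColon line))])) := by
      simp [pwA_core, hp2]
    have hB : pwB_groupStep bs line = bs ++ [[line]] := by simp [pwB_groupStep, hp2]
    rw [hA, hB]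
    right
    refine ⟨[line], bs, by simp, by simp [pwB_build, pwA_afterColon], rfl, ?_⟩
    rcases h with ⟨h2, h1, hbs⟩ | ⟨b, bs', hb, h2, hbs, h1⟩
    · simp [h2, h1, hbs]
    · simp [h2, hbs, h1]
  · have hp' : PySem.Str.startswith line "peer:" = false := by simpa using hp
    have hp2 := hp'
    simp at hp2
    rcases h with ⟨h2, h1, hbs⟩ | ⟨b, bs', hb, h2, hbs, h1⟩
    · -- no current peer, no block yet: both sides skip the line
      obtain ⟨ps, cur⟩ := st
      simp only at h1 h2
      subst h1 h2 hbs
      have hA : pwA_core ([], none) line = ([], none) := by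
        simp [pwA_core, hp2]
      rw [hA]
      simp [pwB_groupStep, hp2, pwRel]
    · -- a field line: A updates current_peer, B appends to the last block
      obtain ⟨ps, cur⟩ := st
      simp only at h1 h2
      subst h1 h2 hbs
      have hB : pwB_groupStep (bs' ++ [b]) line = bs' ++ [b ++ [line]] := by
        simp [pwB_groupStep, hp2, pwAppendLastConcat]
      rw [hB, pwFieldEq _ _ _ hp']
      right
      exact ⟨b ++ [line], bs', by simp, by rw [pwBuildConcat b hb], rfl, rfl⟩

lemma pwFold (ls : List String)
    (st : List (PySem.Dict String String) × Option (PySem.Dict String String))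
    (bs : List (List String)) (h : pwRel st bs) :
    pwRel (ls.foldl pwA_core st) (ls.foldl pwB_groupStep bs) := by
  induction ls generalizing st bs with
  | nil => exact h
  | cons l t ih => exact ih _ _ (pwStep st bs l h)

-- ===== VERDICT (by name: the statement is the Claim_ definition above) =====
theorem parse_wg_status_py_spec : Claim_equal_parse_wg_status_py := by
  intro output _
  unfold Spec_parse_wg_status_py parse_wg_status_py parse_wg_status_py_alt
  have hfold := pwFold ((PySem.Str.splitlines output).map PySem.Str.strip) ([], none) []
    (Or.inl ⟨rfl, rfl, rfl⟩)
  rw [List.foldl_map] at hfold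
  rcases hfold with ⟨h2, h1, hbs⟩ | ⟨b, bs', hb, h2, hbs, h1⟩
  · simp only [h2, h1, hbs]
    simp [h2, h1, hbs]
  · simp only [h2, hbs, h1]
    simp [h2, hbs, h1]
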